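-- pv_equiv track=rewrite | github.com/juliavillela/cs50-introduction-to-ai | extra/crossword2/generate.py | validate_word_list
-- ===== SOURCE A (Python) =====
-- MAX_WORDS = 25
--
-- MIN_WORDS = 3
--
-- MAX_WORD_LEN = 35
--
-- MIN_WORD_LEN = 3
--
-- def validate_word_list(word_list):
--     """
--     Raises an error if word list does not meet any of the criteria
--
--     A word_list is valid if:
--     - it has more than MIN_WORDS and less than MAX_WORDS.
--     - no words in list are either too long or too short
--     - each word has at least one char in common with another word.
--     """
--     # word list is of adequate length
--     if len(word_list) > MAX_WORDS or len(word_list) < MIN_WORDS: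
--         raise ValueError(f"word list should have between {MIN_WORDS} and {MAX_WORDS}, not {len(word_list)}")
--
--     # no words are too long
--     too_long = [w for w in word_list if len(w)>MAX_WORD_LEN]
--     if len(too_long):
--         raise ValueError(f"word list contains words that are longer than {MAX_WORD_LEN}: {too_long}")
--
--     # no words are too short
--     too_short = [w for w in word_list if len(w)<MIN_WORD_LEN]
--     if len(too_short):
--         raise ValueError(f"word list contains words that are shorter than {MIN_WORD_LEN}: {too_short}")
--
--     # words should have at least one char in common with another word
--     for i, word1 in enumerate(word_list):
--         found_common = False
--         for j, word2 in enumerate(word_list):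
--             if i != j:  # Skip comparing the word with itself
--                 if any(char in word2 for char in word1):
--                     found_common = True
--                     break
--         if not found_common:
--             raise ValueError(f"word list is impossible. word '{word1}' has no chars in common with other words")
--
--     return True
-- ===== SOURCE B (Python) =====
-- MAX_WORDS = 25
--
-- MIN_WORDS = 3
--
-- MAX_WORD_LEN = 35
--
-- MIN_WORD_LEN = 3
--
-- def validate_word_list(word_list):
--     if len(word_list) > MAX_WORDS or len(word_list) < MIN_WORDS:
--         raise ValueError(f"word list should have between {MIN_WORDS} and {MAX_WORDS}, not {len(word_list)}")
--
--     too_long = [w for w in word_list if len(w) > MAX_WORD_LEN]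
--     if len(too_long):
--         raise ValueError(f"word list contains words that are longer than {MAX_WORD_LEN}: {too_long}")
--
--     too_short = [w for w in word_list if len(w) < MIN_WORD_LEN]
--     if len(too_short):
--         raise ValueError(f"word list contains words that are shorter than {MIN_WORD_LEN}: {too_short}")
--
--     # one pass: count, for each char, how many words contain it (each word once)
--     count = {}
--     for w in word_list:
--         for c in set(w):
--             count[c] = count.get(c, 0) + 1
--
--     # a word shares a char with ANOTHER word iff some of its chars occurs in >= 2 words
--     for w in word_list:
--         if not any(count.get(c, 0) >= 2 for c in w):
--             raise ValueError(f"word list is impossible. word '{w}' has no chars in common with other words")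
--
--     return True
-- ===== Notes on version B (the rewrite author's own statement) =====
-- stated objective: faster
-- what changed: Replaces the quadratic all-pairs character-overlap scan with a single pass that builds a char -> number-of-words-containing-it counter (each word counted once via set(word)) and then checks each word for a char with count >= 2.
import Mathlib
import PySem

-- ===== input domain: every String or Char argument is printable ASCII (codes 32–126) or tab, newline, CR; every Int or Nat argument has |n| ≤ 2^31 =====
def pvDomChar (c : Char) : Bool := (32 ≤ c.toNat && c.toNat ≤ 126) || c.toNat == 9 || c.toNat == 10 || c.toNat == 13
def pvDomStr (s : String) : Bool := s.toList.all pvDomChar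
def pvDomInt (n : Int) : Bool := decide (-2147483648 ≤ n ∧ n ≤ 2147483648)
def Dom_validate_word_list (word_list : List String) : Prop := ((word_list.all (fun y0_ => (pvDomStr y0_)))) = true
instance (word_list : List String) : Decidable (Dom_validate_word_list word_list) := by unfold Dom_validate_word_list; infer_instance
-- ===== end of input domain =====

-- B replaces A's quadratic all-pairs shared-character scan with a one-pass counter
-- (char -> number of words containing it); both raise identically in Python, so the
-- equivalence is about the returned value True on Pre_ (= the inputs where A returns).

-- ===== PORT A =====
-- the for-loops over enumerate(word_list) with break/raise; `false` marks the raise paths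
def validate_word_list (word_list : List String) : Bool :=
  if word_list.length > 25 || word_list.length < 3 then false
  else if (word_list.filter (fun w => decide (w.toList.length > 35))).length ≠ 0 then false
  else if (word_list.filter (fun w => decide (w.toList.length < 3))).length ≠ 0 then false
  else
    (PySem.List.enumerate word_list).all (fun p =>
      (PySem.List.enumerate word_list).any (fun q =>
        decide (p.1 ≠ q.1) && p.2.toList.any (fun c => q.2.toList.contains c)))

-- ===== PORT B =====
-- count[c] = number of words (each once, via set(w)) that contain c
def pvCountB (word_list : List String) : PySem.Dict Char Int :=
  word_list.foldl
    (fun d w => (PySem.Set.ofList w.toList).foldl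
      (fun d c => d.insert c (d.getD c 0 + 1)) d)
    PySem.Dict.empty

def validate_word_list_alt (word_list : List String) : Bool :=
  if word_list.length > 25 || word_list.length < 3 then false
  else if (word_list.filter (fun w => decide (w.toList.length > 35))).length ≠ 0 then false
  else if (word_list.filter (fun w => decide (w.toList.length < 3))).length ≠ 0 then false
  else
    word_list.all (fun w => w.toList.any (fun c => decide ((pvCountB word_list).getD c 0 ≥ 2)))

-- ===== PRECONDITION & SPEC =====
-- Pre_ is exactly the set of inputs on which Python A returns (anywhere else it raises ValueError)
def Pre_validate_word_list (word_list : List String) : Prop :=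
  word_list.length ≤ 25 ∧ 3 ≤ word_list.length ∧
  (∀ w ∈ word_list, w.toList.length ≤ 35 ∧ 3 ≤ w.toList.length) ∧
  (∀ i, i < word_list.length → ∃ j, j < word_list.length ∧ j ≠ i ∧
    ((word_list.getD i "").toList.any (fun c => (word_list.getD j "").toList.contains c)) = true)
instance (word_list : List String) : Decidable (Pre_validate_word_list word_list) := by
  unfold Pre_validate_word_list; infer_instance

def pvWitness_validate_word_list : List String := ["abc", "bcd", "cde"]

def Spec_validate_word_list (word_list : List String) (out : Bool) : Prop := out = validate_word_list_alt word_list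
instance (word_list : List String) (out : Bool) : Decidable (Spec_validate_word_list word_list out) := by unfold Spec_validate_word_list; infer_instance

-- ===== CLAIM (what is proved, stated in full; the proofs are below) =====
def Claim_equal_validate_word_list : Prop := ∀ (word_list : List String), Dom_validate_word_list word_list → Pre_validate_word_list word_list → Spec_validate_word_list word_list (validate_word_list word_list)

-- ===== LEMMAS AND PROOFS =====

theorem pv_foldl_insert_getD (s : List Char) (hs : s.Nodup) (d : PySem.Dict Char Int) (c : Char) :
    (s.foldl (fun d c => d.insert c (d.getD c 0 + 1)) d).getD c 0
      = d.getD c 0 + (if c ∈ s then 1 else 0) := by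
  induction s generalizing d with
  | nil => simp
  | cons a s ih =>
    simp only [List.foldl_cons]
    rw [ih (List.nodup_cons.mp hs).2]
    by_cases hca : c = a
    · subst hca
      have : c ∉ s := (List.nodup_cons.mp hs).1
      simp [this]
    · simp [PySem.Dict.getD_insert, hca, List.mem_cons]

theorem pvCountB_getD_aux (wl : List String) (d : PySem.Dict Char Int) (c : Char) :
    (wl.foldl (fun d w => (PySem.Set.ofList w.toList).foldl
        (fun d c => d.insert c (d.getD c 0 + 1)) d) d).getD c 0
      = d.getD c 0 + (wl.countP (fun w => w.toList.contains c) : Int) := by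
  induction wl generalizing d with
  | nil => simp
  | cons w wl ih =>
    simp only [List.foldl_cons]
    rw [ih, pv_foldl_insert_getD _ (PySem.Set.nodup_ofList _)]
    simp only [PySem.Set.mem_ofList, List.countP_cons]
    by_cases hc : c ∈ w.toList
    · simp [hc]
      ring
    · simp [hc]

theorem pvCountB_getD (wl : List String) (c : Char) :
    (pvCountB wl).getD c 0 = (wl.countP (fun w => w.toList.contains c) : Int) := by
  unfold pvCountB
  rw [pvCountB_getD_aux]
  simp [PySem.Dict.getD_empty]

theorem pv_shared_iff (wl : List String) (i : Nat) (hi : i < wl.length) :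
    (∃ j, ∃ _ : j < wl.length, j ≠ i ∧ ∃ c ∈ wl[i].toList, c ∈ wl[j].toList)
      ↔ (∃ c ∈ wl[i].toList, 2 ≤ wl.countP (fun w => w.toList.contains c)) := by
  have hsplit : wl = wl.take i ++ wl[i] :: wl.drop (i + 1) := by
    conv_lhs => rw [← List.take_append_drop i wl]
    rw [List.getElem_cons_drop]
  have hLlen : (wl.take i).length = i := by simp [Nat.le_of_lt hi]
  constructor
  · rintro ⟨j, hj, hne, c, hc1, hc2⟩
    refine ⟨c, hc1, ?_⟩
    have hqi : (fun w => w.toList.contains c) wl[i] = true := by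
      simpa [List.contains_iff_mem] using hc1
    have hqj : (fun w => w.toList.contains c) wl[j] = true := by
      simpa [List.contains_iff_mem] using hc2
    have hmem : wl[j] ∈ wl.take i ++ wl.drop (i + 1) := by
      rcases Nat.lt_or_ge j i with h | h
      · apply List.mem_append_left
        exact List.mem_iff_getElem.mpr ⟨j, by omega, by simp⟩
      · have hj' : i + 1 ≤ j := by omega
        apply List.mem_append_right
        refine List.mem_iff_getElem.mpr ⟨j - (i + 1), by simp only [List.length_drop]; omega, ?_⟩

        rw [List.getElem_drop]
        congr 1
        omega
    have h1 : 0 < (wl.take i ++ wl.drop (i + 1)).countP (fun w => w.toList.contains c) :=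
      List.countP_pos_iff.mpr ⟨wl[j], hmem, hqj⟩
    rw [List.countP_append] at h1
    have hcnt : wl.countP (fun w => w.toList.contains c)
        = (wl.take i).countP (fun w => w.toList.contains c)
          + (1 + (wl.drop (i + 1)).countP (fun w => w.toList.contains c)) := by
      conv_lhs => rw [hsplit]
      rw [List.countP_append, List.countP_cons, if_pos hqi]
      omega
    omega
  · rintro ⟨c, hc1, h2⟩
    have hqi : (fun w => w.toList.contains c) wl[i] = true := by
      simpa [List.contains_iff_mem] using hc1
    have hcnt : wl.countP (fun w => w.toList.contains c)
        = (wl.take i).countP (fun w => w.toList.contains c)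
          + (1 + (wl.drop (i + 1)).countP (fun w => w.toList.contains c)) := by
      conv_lhs => rw [hsplit]
      rw [List.countP_append, List.countP_cons, if_pos hqi]
      omega
    have : 0 < (wl.take i).countP (fun w => w.toList.contains c) ∨
           0 < (wl.drop (i + 1)).countP (fun w => w.toList.contains c) := by omega
    rcases this with h | h
    · obtain ⟨x, hx, hqx⟩ := List.countP_pos_iff.mp h
      obtain ⟨k, hk, hxk⟩ := List.mem_iff_getElem.mp hx
      have hki : k < i := by rwa [hLlen] at hk
      refine ⟨k, by omega, by omega, c, hc1, ?_⟩
      have : wl[k]'(by omega) = x := by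
        rw [← hxk]; simp [List.getElem_take]
      rw [this]
      simpa [List.contains_iff_mem] using hqx
    · obtain ⟨x, hx, hqx⟩ := List.countP_pos_iff.mp h
      obtain ⟨k, hk, hxk⟩ := List.mem_iff_getElem.mp hx
      have hklt : i + 1 + k < wl.length := by simp only [List.length_drop] at hk; omega
      refine ⟨i + 1 + k, hklt, by omega, c, hc1, ?_⟩
      have : wl[i + 1 + k]'hklt = x := by rw [← hxk]; simp [List.getElem_drop]
      rw [this]
      simpa [List.contains_iff_mem] using hqx

theorem pv_alls_eq (wl : List String) :
    ((PySem.List.enumerate wl).all (fun p =>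
        (PySem.List.enumerate wl).any (fun q =>
          decide (p.1 ≠ q.1) && p.2.toList.any (fun c => q.2.toList.contains c))))
      = wl.all (fun w => w.toList.any (fun c => decide ((pvCountB wl).getD c 0 ≥ 2))) := by
  rw [Bool.eq_iff_iff]
  simp only [List.all_eq_true, List.any_eq_true, PySem.List.mem_enumerate_iff,
    Bool.and_eq_true, decide_eq_true_eq, List.contains_iff_mem, pvCountB_getD]
  constructor
  · intro h w hw
    obtain ⟨i, hi, hwi⟩ := List.mem_iff_getElem.mp hw
    subst hwi
    obtain ⟨q, ⟨j, hj, hq⟩, hne, c, hc1, hc2⟩ := h (0 + i, wl[i]) ⟨i, hi, rfl⟩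
    subst hq
    have hji : j ≠ i := by intro e; subst e; exact hne rfl
    obtain ⟨c', hc', hcount⟩ := (pv_shared_iff wl i hi).mp ⟨j, hj, hji, c, hc1, hc2⟩
    exact ⟨c', hc', by exact_mod_cast hcount⟩
  · intro h p hp
    obtain ⟨i, hi, hpi⟩ := hp
    subst hpi
    have hmem : wl[i] ∈ wl := List.getElem_mem hi
    obtain ⟨c, hc, hcount⟩ := h wl[i] hmem
    have : 2 ≤ wl.countP (fun w => w.toList.contains c) := by exact_mod_cast hcount
    obtain ⟨j, hj, hji, c', hc1, hc2⟩ := (pv_shared_iff wl i hi).mpr ⟨c, hc, this⟩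
    refine ⟨(0 + j, wl[j]), ⟨j, hj, rfl⟩, ?_, c', hc1, hc2⟩
    intro e
    have hij : (i : Int) = (j : Int) := by simpa using e
    exact hji (by exact_mod_cast hij.symm)

-- ===== VERDICT (by name: the statement is the Claim_ definition above) =====
theorem validate_word_list_spec : Claim_equal_validate_word_list := by
  intro wl _ _
  show validate_word_list wl = validate_word_list_alt wl
  unfold validate_word_list validate_word_list_alt
  split_ifs <;> first | rfl | exact pv_alls_eq wl
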